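-- pv_equiv track=rewrite | github.com/pablocnds/dynamic_visualizer | src/visualizer/cards/utils.py | _template_to_glob
-- ===== SOURCE A (Python) =====
-- from typing import Dict, List
--
-- def _template_to_glob(template: str) -> str:
--     pattern: List[str] = []
--     i = 0
--     length = len(template)
--     while i < length:
--         if template.startswith("{{", i):
--             end = template.find("}}", i)
--             if end == -1:
--                 raise ValueError("Unclosed variable in template")
--             pattern.append("*")
--             i = end + 2
--         else:
--             pattern.append(template[i])
--             i += 1
--     return "".join(pattern)
-- ===== SOURCE B (Python) =====
-- def _template_to_glob(template: str) -> str: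
--     # Chunked scan: jump between "{{" occurrences with str.find and copy whole
--     # slices, instead of per-character scanning.
--     parts = []
--     i = 0
--     while True:
--         j = template.find("{{", i)
--         if j == -1:
--             parts.append(template[i:])
--             return "".join(parts)
--         parts.append(template[i:j])
--         parts.append("*")
--         k = template.find("}}", j + 2)
--         if k == -1:
--             raise ValueError("Unclosed variable in template")
--         i = k + 2
-- ===== Notes on version B (the rewrite author's own statement) =====
-- stated objective: faster
-- what changed: Replaced A's per-character while-loop with a chunked scan that uses find to jump directly between variable markers and copies each literal chunk as one slice; on an unclosed variable such as '{{' both raise the same ValueError (excluded by Pre_).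
-- outside the precondition, e.g. on _template_to_glob('{{'): A raises ValueError, B raises ValueError
import Mathlib
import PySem

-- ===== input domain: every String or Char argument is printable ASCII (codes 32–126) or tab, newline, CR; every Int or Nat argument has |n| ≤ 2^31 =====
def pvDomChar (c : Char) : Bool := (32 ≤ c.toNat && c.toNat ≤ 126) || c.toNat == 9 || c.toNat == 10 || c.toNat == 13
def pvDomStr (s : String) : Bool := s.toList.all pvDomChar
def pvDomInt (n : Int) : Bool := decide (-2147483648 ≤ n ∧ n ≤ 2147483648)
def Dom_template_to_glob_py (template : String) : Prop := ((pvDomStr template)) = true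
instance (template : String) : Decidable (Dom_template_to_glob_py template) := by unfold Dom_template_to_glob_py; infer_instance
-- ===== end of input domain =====

-- B replaces A's per-character scan with a chunked scan that jumps between "{{"
-- occurrences and copies whole literal chunks at once (alternative decomposition).


-- ===== PORT A =====
-- template.find("}}", i) with i at a "{{": a match cannot start on either '{'
-- character, so scanning the remainder after the "{{" is exact; returns the
-- suffix after the first "}}" (none = not found).
def findClose : List Char → Option (List Char)
  | [] => none
  | [_] => none
  | c :: d :: rest => if c = '}' ∧ d = '}' then some rest else findClose (d :: rest)

theorem findClose_length : ∀ (l : List Char) (r : List Char), findClose l = some r → r.length ≤ l.length := by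
  intro l
  induction l with
  | nil => simp [findClose]
  | cons c t ih =>
    cases t with
    | nil => simp [findClose]
    | cons d rest =>
      intro r h
      simp only [findClose] at h
      split_ifs at h with hcd
      · injection h with h; subst h; simp; omega
      · have := ih r h; simp at this ⊢; omega

-- A's while-loop, one character at a time: copy the character, or at "{{" emit
-- '*' and resume after the matching "}}"; the find-failure branch raises
-- ValueError and is excluded by Pre_.
def goA : List Char → List Char
  | [] => []
  | [c] => [c]
  | c :: d :: rest =>
    if c = '{' ∧ d = '{' then
      match hfc : findClose rest with
      | none => []   -- raise ValueError("Unclosed variable in template")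
      | some rest' => '*' :: goA rest'
    else c :: goA (d :: rest)
termination_by l => l.length
decreasing_by
  · have := findClose_length rest _ hfc; simp; omega
  · simp

def template_to_glob_py (template : String) : String := String.ofList (goA template.toList)

-- ===== PORT B =====
-- template.find("{{", i): returns the literal chunk before the first "{{" and
-- the suffix after it (none = not found).
def findOpen : List Char → Option (List Char × List Char)
  | [] => none
  | [_] => none
  | c :: d :: rest =>
    if c = '{' ∧ d = '{' then some ([], rest)
    else
      match findOpen (d :: rest) with
      | none => none
      | some (p, r) => some (c :: p, r)

theorem findOpen_spec : ∀ (l : List Char) (p r : List Char), findOpen l = some (p, r) → l = p ++ '{' :: '{' :: r := by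
  intro l
  induction l with
  | nil => simp [findOpen]
  | cons c t ih =>
    cases t with
    | nil => simp [findOpen]
    | cons d rest =>
      intro p r h
      simp only [findOpen] at h
      split_ifs at h with hcd
      · obtain ⟨rfl, rfl⟩ := hcd
        injection h with h
        injection h with h1 h2
        subst h1; subst h2; rfl
      · cases hfo : findOpen (d :: rest) with
        | none => rw [hfo] at h; cases h
        | some pr =>
          obtain ⟨p', r'⟩ := pr
          rw [hfo] at h
          injection h with h
          injection h with h1 h2
          subst h1; subst h2
          simpa using ih p' r' hfo

-- B's while-loop, one chunk at a time: emit the literal chunk, a '*', and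
-- resume after the closing "}}".
def goB (l : List Char) : List Char :=
  match h : findOpen l with
  | none => l
  | some (pre, rest) =>
    match hfc : findClose rest with
    | none => []   -- raise ValueError("Unclosed variable in template")
    | some rest' => pre ++ '*' :: goB rest'
termination_by l.length
decreasing_by
  have h3 := findOpen_spec l _ _ h
  have h4 := findClose_length rest _ hfc
  subst h3; simp; omega

def template_to_glob_py_alt (template : String) : String := String.ofList (goB template.toList)

-- ===== PRECONDITION & SPEC =====
-- does the list contain "}}"?
def hasClose : List Char → Bool
  | [] => false
  | [_] => false
  | c :: d :: rest => if c = '}' ∧ d = '}' then true else hasClose (d :: rest)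

-- every occurrence of "{{" is followed (somewhere later) by "}}"
def okT : List Char → Bool
  | [] => true
  | [_] => true
  | c :: d :: rest => (if c = '{' ∧ d = '{' then hasClose rest else true) && okT (d :: rest)

-- Pre_ excludes exactly the templates containing an unclosed "{{", on which A
-- raises ValueError (B raises the same ValueError there).
def Pre_template_to_glob_py (template : String) : Prop := okT template.toList = true
instance (template : String) : Decidable (Pre_template_to_glob_py template) := by
  unfold Pre_template_to_glob_py; infer_instance

def pvWitness_template_to_glob_py : String := "a{{ x }}b{{y}}"

def Spec_template_to_glob_py (template : String) (out : String) : Prop := out = template_to_glob_py_alt template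
instance (template : String) (out : String) : Decidable (Spec_template_to_glob_py template out) := by unfold Spec_template_to_glob_py; infer_instance

-- ===== CLAIM (what is proved, stated in full; the proofs are below) =====
def Claim_equal_template_to_glob_py : Prop := ∀ (template : String), Dom_template_to_glob_py template → Pre_template_to_glob_py template → Spec_template_to_glob_py template (template_to_glob_py template)

-- ===== LEMMAS AND PROOFS =====

theorem okT_cons (c : Char) (l : List Char) (h : okT (c :: l) = true) : okT l = true := by
  cases l with
  | nil => rfl
  | cons d rest => simp only [okT, Bool.and_eq_true] at h; exact h.2

theorem okT_append (a b : List Char) (h : okT (a ++ b) = true) : okT b = true := by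
  induction a with
  | nil => exact h
  | cons c a ih => exact ih (okT_cons c _ h)

theorem okT_open (a b : List Char) (h : okT (a ++ '{' :: '{' :: b) = true) : hasClose b = true := by
  induction a with
  | nil =>
    simp only [List.nil_append, okT, Bool.and_eq_true] at h
    simpa using h.1
  | cons c a ih => exact ih (okT_cons c _ h)

theorem hasClose_findClose : ∀ (l : List Char), hasClose l = true → ∃ r, findClose l = some r := by
  intro l
  induction l with
  | nil => simp [hasClose]
  | cons c t ih =>
    cases t with
    | nil => simp [hasClose]
    | cons d rest =>
      intro h
      simp only [hasClose] at h
      simp only [findClose]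
      split_ifs at h ⊢ with hcd
      · exact ⟨rest, rfl⟩
      · exact ih h

theorem findClose_spec : ∀ (l : List Char) (r : List Char), findClose l = some r → ∃ c, l = c ++ '}' :: '}' :: r := by
  intro l
  induction l with
  | nil => simp [findClose]
  | cons c t ih =>
    cases t with
    | nil => simp [findClose]
    | cons d rest =>
      intro r h
      simp only [findClose] at h
      split_ifs at h with hcd
      · obtain ⟨rfl, rfl⟩ := hcd
        injection h with h; subst h
        exact ⟨[], rfl⟩
      · obtain ⟨e, he⟩ := ih r h
        exact ⟨c :: e, by simp [he]⟩

-- goA expressed through the first "{{": everything before it is copied verbatim.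
theorem goA_findOpen : ∀ (l : List Char),
    goA l = match findOpen l with
      | none => l
      | some (pre, rest) => pre ++ goA ('{' :: '{' :: rest) := by
  intro l
  induction l with
  | nil => simp [goA, findOpen]
  | cons c t ih =>
    cases t with
    | nil => simp [goA, findOpen]
    | cons d rest =>
      by_cases hcd : c = '{' ∧ d = '{'
      · obtain ⟨rfl, rfl⟩ := hcd
        simp [findOpen]
      · rw [goA.eq_def]
        simp only [findOpen, if_neg hcd]
        rw [ih]
        cases hfo : findOpen (d :: rest) with
        | none => simp
        | some pr => obtain ⟨p, r⟩ := pr; simp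

theorem goA_eq_goB : ∀ (n : ℕ) (l : List Char), l.length ≤ n → okT l = true → goA l = goB l := by
  intro n
  induction n with
  | zero =>
    intro l hl _
    have : l = [] := by cases l <;> simp_all
    subst this
    rw [goB.eq_def]; simp [goA, findOpen]
  | succ n ih =>
    intro l hl hok
    rw [goB.eq_def]
    split
    · rename_i hopen
      rw [goA_findOpen, hopen]
    · rename_i pre rest hopen
      have hsplit := findOpen_spec l _ _ hopen
      have hhas : hasClose rest = true := okT_open pre rest (hsplit ▸ hok)
      obtain ⟨rest', hclose⟩ := hasClose_findClose rest hhas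
      rw [hclose]
      obtain ⟨e, he⟩ := findClose_spec rest _ hclose
      have hok' : okT rest' = true := by
        have h2 : okT rest = true :=
          okT_cons _ _ (okT_cons _ _ (okT_append pre _ (hsplit ▸ hok)))
        exact okT_append (e ++ ['}', '}']) rest' (by simpa [he] using h2)
      have hlen : rest'.length ≤ n := by
        subst hsplit
        have : rest = e ++ '}' :: '}' :: rest' := he
        subst this
        simp at hl
        omega
      rw [goA_findOpen, hopen]
      dsimp only
      rw [goA.eq_def]
      dsimp only
      rw [if_pos (And.intro rfl rfl)]
      refine congrArg (pre ++ ·) ?_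
      split
      next hn => rw [hn] at hclose; cases hclose
      next r' hsome =>
        rw [hsome] at hclose
        injection hclose with hclose
        subst hclose
        rw [ih _ hlen hok']

-- ===== VERDICT (by name: the statement is the Claim_ definition above) =====
theorem template_to_glob_py_spec : Claim_equal_template_to_glob_py := by
  intro template _ hpre
  unfold Spec_template_to_glob_py template_to_glob_py template_to_glob_py_alt
  rw [goA_eq_goB template.toList.length _ le_rfl hpre]
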